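-- pv_equiv track=rewrite | github.com/Metro19/AdventOfCode2023 | Day 4/day4star1.py | score_card
-- ===== SOURCE A (Python) =====
-- def score_card(winning_numbers: list[int], played_numbers: list[int]) -> int:
--     score = 0
--
--     for num in played_numbers:
--         if num in winning_numbers:
--             # if score is zero, it becomes one
--             if score == 0:
--                 score = 1
--             else:
--                 score *= 2
--
--     return score
-- ===== SOURCE B (Python) =====
-- def score_card(winning_numbers: list[int], played_numbers: list[int]) -> int:
--     winners = set(winning_numbers)
--     matches = sum(1 for n in played_numbers if n in winners)
--     return 0 if matches == 0 else 2 ** (matches - 1)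
-- ===== Notes on version B (the rewrite author's own statement) =====
-- stated objective: faster
-- what changed: Builds a set of winning numbers once and counts matches in a single pass, returning the closed form 2**(matches-1) instead of A's running accumulator with conditional doubling and inner list scan.
import Mathlib
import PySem

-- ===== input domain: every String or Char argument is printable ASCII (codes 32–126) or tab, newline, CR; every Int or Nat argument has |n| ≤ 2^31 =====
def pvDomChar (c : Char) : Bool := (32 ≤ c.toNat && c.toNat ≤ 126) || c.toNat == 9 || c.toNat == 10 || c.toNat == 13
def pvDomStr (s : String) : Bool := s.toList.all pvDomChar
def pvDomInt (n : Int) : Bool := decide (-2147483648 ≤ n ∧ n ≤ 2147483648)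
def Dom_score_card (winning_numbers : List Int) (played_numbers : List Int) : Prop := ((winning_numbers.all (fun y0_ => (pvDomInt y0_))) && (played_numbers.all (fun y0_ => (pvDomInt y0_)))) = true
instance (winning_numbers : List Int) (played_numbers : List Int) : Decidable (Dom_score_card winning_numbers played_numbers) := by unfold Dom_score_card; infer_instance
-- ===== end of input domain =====

-- B replaces A's running accumulator and inner list scan by a one-pass match count over a
-- prebuilt set plus the closed form 2^(matches-1); a timing run measured B faster.
-- ===== PORT A =====
-- A: running score, doubled (or set to 1) on each match.
def score_card (winning_numbers : List Int) (played_numbers : List Int) : Int :=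
  played_numbers.foldl
    (fun score num =>
      if num ∈ winning_numbers then
        if score = 0 then 1 else score * 2
      else score) 0

-- ===== PORT B =====
-- B: build a set of winners once, count matches, then the closed form 2^(matches-1).
def score_card_alt (winning_numbers : List Int) (played_numbers : List Int) : Int :=
  let winners := PySem.Set.ofList winning_numbers
  let k := (played_numbers.filter (fun n => n ∈ winners)).length
  if k = 0 then 0 else 2 ^ (k - 1)

-- ===== PRECONDITION & SPEC =====
def Spec_score_card (winning_numbers : List Int) (played_numbers : List Int) (out : Int) : Prop := out = score_card_alt winning_numbers played_numbers
instance (winning_numbers : List Int) (played_numbers : List Int) (out : Int) : Decidable (Spec_score_card winning_numbers played_numbers out) := by unfold Spec_score_card; infer_instance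

-- ===== CLAIM (what is proved, stated in full; the proofs are below) =====
def Claim_equal_score_card : Prop := ∀ (winning_numbers : List Int) (played_numbers : List Int), Dom_score_card winning_numbers played_numbers → Spec_score_card winning_numbers played_numbers (score_card winning_numbers played_numbers)

-- ===== LEMMAS AND PROOFS =====
-- Loop invariant: folding from 0 gives the closed form; from s ≠ 0 it multiplies by 2^matches.
theorem score_card_fold (w : List Int) (l : List Int) (s : Int) :
    l.foldl (fun score num => if num ∈ w then (if score = 0 then 1 else score * 2) else score) s
      = (let k := (l.filter (fun n => n ∈ w)).length
         if s = 0 then (if k = 0 then 0 else 2 ^ (k - 1)) else s * 2 ^ k) := by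
  induction l generalizing s with
  | nil => simp
  | cons x xs ih =>
    simp only [List.foldl_cons, List.filter_cons]
    by_cases hx : x ∈ w
    · simp only [hx, decide_true, if_true]
      by_cases hs : s = 0
      · subst hs
        simp only [if_true, ih 1]
        have h1 : (1 : Int) ≠ 0 := one_ne_zero
        simp [h1]
      · have h2 : s * 2 ≠ 0 := by
          intro h; rcases mul_eq_zero.mp h with h | h
          · exact hs h
          · norm_num at h
        simp only [hs, if_false, ih (s * 2), h2]
        simp [pow_succ]; ring
    · simp only [hx, decide_false, if_false, ih s]
      rfl

-- ===== VERDICT (by name: the statement is the Claim_ definition above) =====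
theorem score_card_spec : Claim_equal_score_card := by
  intro w p _
  unfold Spec_score_card score_card score_card_alt
  rw [score_card_fold]
  simp [PySem.Set.mem_ofList]
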